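-- pv_equiv track=rewrite | github.com/fumbl3b/aoc2024 | src/day9/part2.py | find_free_spans
-- ===== SOURCE A (Python) =====
-- def find_free_spans(hard_drive):
--     free_spans = []  # List of (start_index, length)
--     in_free_span = False
--     start_index = 0
--
--     for i, block in enumerate(hard_drive):
--         if block == '.':
--             if not in_free_span:
--                 # Start of a free span
--                 in_free_span = True
--                 start_index = i
--         else:
--             if in_free_span:
--                 # End of a free span
--                 span_length = i - start_index
--                 free_spans.append((start_index, span_length))
--                 in_free_span = False
--
--     # Handle free span at the end
--     if in_free_span:
--         span_length = len(hard_drive) - start_index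
--         free_spans.append((start_index, span_length))
--
--     return free_spans
-- ===== SOURCE B (Python) =====
-- def find_free_spans(hard_drive):
--     # Run-grouping pass: jump over each maximal run of equal blocks,
--     # recording (start, length) for the '.' runs. No flag, no tail flush.
--     spans = []
--     idx = 0
--     n = len(hard_drive)
--     while idx < n:
--         block = hard_drive[idx]
--         j = idx + 1
--         while j < n and hard_drive[j] == block:
--             j += 1
--         if block == '.':
--             spans.append((idx, j - idx))
--         idx = j
--     return spans
-- ===== Notes on version B (the rewrite author's own statement) =====
-- stated objective: simpler
-- what changed: Replaces A's flag+start state machine with end-of-loop flush by a single run-grouping pass that jumps over each maximal run of equal blocks and records the '.' runs directly.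
import Mathlib
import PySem

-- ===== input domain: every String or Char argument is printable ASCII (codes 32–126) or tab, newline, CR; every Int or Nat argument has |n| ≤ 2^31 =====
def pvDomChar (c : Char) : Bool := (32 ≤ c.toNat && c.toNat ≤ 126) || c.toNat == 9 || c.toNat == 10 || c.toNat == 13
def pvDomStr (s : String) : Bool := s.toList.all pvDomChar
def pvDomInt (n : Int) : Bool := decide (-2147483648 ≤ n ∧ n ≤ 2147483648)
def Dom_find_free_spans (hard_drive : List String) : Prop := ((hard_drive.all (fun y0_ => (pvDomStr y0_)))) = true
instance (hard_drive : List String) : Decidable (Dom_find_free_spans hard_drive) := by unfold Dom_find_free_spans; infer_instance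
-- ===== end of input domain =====

-- B replaces A's flag + end-of-loop flush state machine by a run-grouping pass
-- that jumps over maximal runs of equal blocks (objective: simpler).

-- ===== PORT A =====
-- the for-loop of A as structural recursion over the list, carrying
-- (index i, accumulated spans, in_free_span flag, start_index)
def ffsLoop : List String → Int → List (Int × Int) → Bool → Int →
    (List (Int × Int) × Bool × Int)
  | [], _, spans, inf, st => (spans, inf, st)
  | b :: rest, i, spans, inf, st =>
    if b == "." then
      if !inf then ffsLoop rest (i + 1) spans true i
      else ffsLoop rest (i + 1) spans inf st
    else
      if inf then ffsLoop rest (i + 1) (spans ++ [(st, i - st)]) false st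
      else ffsLoop rest (i + 1) spans inf st

def find_free_spans (hard_drive : List String) : List (Int × Int) :=
  let r := ffsLoop hard_drive 0 [] false 0
  if r.2.1 then r.1 ++ [(r.2.2, (hard_drive.length : Int) - r.2.2)] else r.1

-- ===== PORT B =====
-- Source B's outer while-loop: each step consumes one maximal run of equal blocks
-- (the inner scan is the takeWhile/dropWhile split), emitting the '.' runs
def ffsAlt : List String → Int → List (Int × Int)
  | [], _ => []
  | b :: rest, idx =>
    let run := rest.takeWhile (fun x => x == b)
    let len : Int := 1 + (run.length : Int)
    (if b == "." then [(idx, len)] else []) ++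
      ffsAlt (rest.dropWhile (fun x => x == b)) (idx + len)
  termination_by l _ => l.length
  decreasing_by
    simp only [List.length_cons]
    exact Nat.lt_succ_of_le (List.length_dropWhile_le _ _)

def find_free_spans_alt (hard_drive : List String) : List (Int × Int) :=
  ffsAlt hard_drive 0

-- ===== PRECONDITION & SPEC =====
def Spec_find_free_spans (hard_drive : List String) (out : List (Int × Int)) : Prop := out = find_free_spans_alt hard_drive
instance (hard_drive : List String) (out : List (Int × Int)) : Decidable (Spec_find_free_spans hard_drive out) := by unfold Spec_find_free_spans; infer_instance

-- ===== CLAIM (what is proved, stated in full; the proofs are below) =====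
def Claim_equal_find_free_spans : Prop := ∀ (hard_drive : List String), Dom_find_free_spans hard_drive → Spec_find_free_spans hard_drive (find_free_spans hard_drive)

-- ===== LEMMAS AND PROOFS =====

-- A's loop result, flushed at end index i + l.length (as the Python does with len(hard_drive))
def wrapA (l : List String) (i : Int) (spans : List (Int × Int)) (inf : Bool) (st : Int) :
    List (Int × Int) :=
  let r := ffsLoop l i spans inf st
  if r.2.1 then r.1 ++ [(r.2.2, (i + (l.length : Int)) - r.2.2)] else r.1

-- skipping one leading non-'.' block does not change B's output
theorem ffsAlt_cons_nondot (b : String) (rest : List String) (i : Int) (hb : ¬ b = ".") :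
    ffsAlt (b :: rest) i = ffsAlt rest (i + 1) := by
  cases rest with
  | nil => simp [ffsAlt, hb]
  | cons c rest2 =>
    by_cases hc : c = b
    · subst hc
      rw [ffsAlt, ffsAlt]
      simp only [List.takeWhile, List.dropWhile, beq_self_eq_true]
      simp [hb]
      push_cast
      ring_nf
    · have hcb : (c == b) = false := by simp [hc]
      conv_lhs => rw [ffsAlt]
      simp only [List.takeWhile, List.dropWhile, hcb]
      simp [hb]

theorem wrapA_eq (l : List String) :
    (∀ i spans st, wrapA l i spans false st = spans ++ ffsAlt l i) ∧
    (∀ i spans st, wrapA l i spans true st =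
      spans ++ (st, (i + ((l.takeWhile (fun x => x == ".")).length : Int)) - st) ::
        ffsAlt (l.dropWhile (fun x => x == ".")) (i + ((l.takeWhile (fun x => x == ".")).length : Int))) := by
  induction l with
  | nil =>
    constructor
    · intro i spans st; simp [wrapA, ffsLoop, ffsAlt]
    · intro i spans st; simp [wrapA, ffsLoop, ffsAlt]
  | cons b rest ih =>
    obtain ⟨ihF, ihT⟩ := ih
    by_cases hb : b = "."
    · subst hb
      constructor
      · intro i spans st
        have h1 : wrapA ("." :: rest) i spans false st = wrapA rest (i + 1) spans true i := by
          simp [wrapA, ffsLoop]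
          push_cast
          ring_nf
        rw [h1, ihT]
        rw [ffsAlt]
        simp only [beq_self_eq_true, List.takeWhile, List.dropWhile, List.length_cons]
        simp
        push_cast
        ring_nf
        trivial
      · intro i spans st
        have h1 : wrapA ("." :: rest) i spans true st = wrapA rest (i + 1) spans true st := by
          simp [wrapA, ffsLoop]
          push_cast
          ring_nf
        rw [h1, ihT]
        simp only [List.takeWhile, List.dropWhile, beq_self_eq_true, List.length_cons]
        push_cast
        ring_nf
    · have hbeq : (b == ".") = false := by simp [hb]
      constructor
      · intro i spans st
        have h1 : wrapA (b :: rest) i spans false st = wrapA rest (i + 1) spans false st := by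
          simp [wrapA, ffsLoop, hbeq]
          push_cast
          ring_nf
        rw [h1, ihF, ffsAlt_cons_nondot b rest i hb]
      · intro i spans st
        have h1 : wrapA (b :: rest) i spans true st
            = wrapA rest (i + 1) (spans ++ [(st, i - st)]) false st := by
          simp [wrapA, ffsLoop, hbeq]
          push_cast
          ring_nf
        rw [h1, ihF]
        simp only [List.takeWhile, List.dropWhile, hbeq, List.length_nil,
          Nat.cast_zero, add_zero]
        rw [ffsAlt_cons_nondot b rest i hb]
        simp

-- ===== VERDICT (by name: the statement is the Claim_ definition above) =====
theorem find_free_spans_spec : Claim_equal_find_free_spans := by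
  intro hd _
  show find_free_spans hd = find_free_spans_alt hd
  have := (wrapA_eq hd).1 0 [] 0
  simpa [wrapA, find_free_spans, find_free_spans_alt] using this
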